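-- pv_equiv track=rewrite | github.com/baguioni/cnn-accelerator | sim/behav_sim.py | generate_sequential_array
-- ===== SOURCE A (Python) =====
-- def generate_sequential_array(input_size, precision):
--     max_value = 1 << precision
--     total_elements = input_size * input_size
--     array_1d = [i % max_value for i in range(total_elements)]
--
--     array_2d = []
--     for row_index in range(input_size):
--         start = row_index * input_size
--         end = start + input_size
--         array_2d.append(array_1d[start:end])
--
--     return array_2d
-- ===== SOURCE B (Python) =====
-- def generate_sequential_array(input_size, precision):
--     max_value = 1 << precision
--     return [[(r * input_size + c) % max_value for c in range(input_size)]
--             for r in range(input_size)]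
-- ===== Notes on version B (the rewrite author's own statement) =====
-- stated objective: simpler
-- what changed: B builds each row directly from coordinates (r*n+c) % 2^p in one nested comprehension, removing A's intermediate flat n*n buffer and the slicing pass.
import Mathlib
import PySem

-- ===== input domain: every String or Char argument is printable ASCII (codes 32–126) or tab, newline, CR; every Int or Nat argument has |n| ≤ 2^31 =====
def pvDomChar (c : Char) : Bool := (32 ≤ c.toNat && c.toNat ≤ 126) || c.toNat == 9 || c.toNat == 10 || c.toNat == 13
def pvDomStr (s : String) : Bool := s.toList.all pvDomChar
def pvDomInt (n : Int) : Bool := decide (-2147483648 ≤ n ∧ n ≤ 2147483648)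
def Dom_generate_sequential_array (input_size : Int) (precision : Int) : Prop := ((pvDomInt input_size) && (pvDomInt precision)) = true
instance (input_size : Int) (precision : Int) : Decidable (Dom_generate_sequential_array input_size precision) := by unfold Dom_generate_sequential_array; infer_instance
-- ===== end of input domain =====

-- B builds each row directly from coordinates (r*n+c) % 2^p, removing A's flat buffer and slicing pass (simpler decomposition).


-- ===== PORT A =====
def generate_sequential_array (input_size : Int) (precision : Int) : List (List Int) :=
  let max_value : Int := 1 <<< precision.toNat
  let total_elements : Int := input_size * input_size
  let array_1d : List Int := (PySem.List.pyRange 0 total_elements 1).map (fun i => PySem.Int.mod i max_value)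
  let array_2d : List (List Int) :=
    (PySem.List.pyRange 0 input_size 1).foldl (fun acc row_index =>
      let start := row_index * input_size
      let stop := start + input_size
      acc ++ [PySem.List.slice array_1d (some start) (some stop)]) []
  array_2d

-- ===== PORT B =====
def generate_sequential_array_alt (input_size : Int) (precision : Int) : List (List Int) :=
  let max_value : Int := 1 <<< precision.toNat
  (PySem.List.pyRange 0 input_size 1).map (fun r =>
    (PySem.List.pyRange 0 input_size 1).map (fun c =>
      PySem.Int.mod (r * input_size + c) max_value))

-- ===== PRECONDITION & SPEC =====
-- Pre_ excludes precision < 0, on which Python's '1 << precision' raises ValueError in both A and B.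
def Pre_generate_sequential_array (input_size : Int) (precision : Int) : Prop := 0 ≤ precision
instance (input_size : Int) (precision : Int) : Decidable (Pre_generate_sequential_array input_size precision) := by unfold Pre_generate_sequential_array; infer_instance
def pvWitness_generate_sequential_array : Int × Int := (3, 2)

def Spec_generate_sequential_array (input_size : Int) (precision : Int) (out : List (List Int)) : Prop := out = generate_sequential_array_alt input_size precision
instance (input_size : Int) (precision : Int) (out : List (List Int)) : Decidable (Spec_generate_sequential_array input_size precision out) := by unfold Spec_generate_sequential_array; infer_instance

-- ===== CLAIM (what is proved, stated in full; the proofs are below) =====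
def Claim_equal_generate_sequential_array : Prop := ∀ (input_size : Int) (precision : Int), Dom_generate_sequential_array input_size precision → Pre_generate_sequential_array input_size precision → Spec_generate_sequential_array input_size precision (generate_sequential_array input_size precision)

-- ===== LEMMAS AND PROOFS =====

-- slice of the flat buffer at row j equals the coordinate-built row (core fact, Nat row index)
lemma pv_row_eq (n : Nat) (m : Int) (j : Nat) (hj : j < n) :
    PySem.List.slice ((PySem.List.pyRange 0 ((n : Int) * n) 1).map (fun i => PySem.Int.mod i m))
      (some ((j : Int) * n)) (some ((j : Int) * n + n)) =
    (PySem.List.pyRange 0 (n : Int) 1).map (fun c => PySem.Int.mod ((j : Int) * n + c) m) := by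
  have h1 : ((j : Int) * n) = ((j * n : Nat) : Int) := by push_cast; ring
  rw [h1, PySem.List.slice_natCast_add, PySem.List.pyRange_one, PySem.List.pyRange_one]
  have hNN : (((n : Int) * n - 0)).toNat = n * n := by omega
  rw [hNN]
  have hle : j * n + n ≤ n * n := by nlinarith
  apply List.ext_getElem
  · simp; omega
  · intro i hi1 hi2
    simp only [List.getElem_map, List.getElem_take, List.getElem_drop, List.getElem_range]
    congr 1
    push_cast
    ring

-- ===== VERDICT =====
theorem generate_sequential_array_spec : Claim_equal_generate_sequential_array := by
  intro n p _ _
  unfold Spec_generate_sequential_array generate_sequential_array generate_sequential_array_alt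
  simp only []
  rw [PySem.List.foldl_append_singleton_eq_map, List.nil_append,
      PySem.List.pyRange_one 0 n, List.map_map, List.map_map]
  apply List.map_congr_left
  intro j hj
  simp only [List.mem_range, sub_zero] at hj
  have hn : n = ((n.toNat : Nat) : Int) := by omega
  have hrow := pv_row_eq n.toNat (1 <<< p.toNat) j hj
  simp only [Function.comp, zero_add]
  rw [hn]
  rw [hrow, PySem.List.pyRange_one 0 ((n.toNat : Nat) : Int)]
  simp
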